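-- pv_equiv track=rewrite | github.com/Yaksh-Projectkmt/OEA_AI_DEV | test.py | SACompare
-- ===== SOURCE A (Python) =====
-- def SACompare(list1, val):
--     l=[]
--     for x in list1:
--         if x>=val:
--             l.append(1)
--         else:
--             l.append(0)
--     if 1 in l:
--         return True
--     else:
--         return False
-- ===== SOURCE B (Python) =====
-- def SACompare(list1, val):
--     return any(x >= val for x in list1)
-- ===== Notes on version B (the rewrite author's own statement) =====
-- stated objective: idiomatic
-- what changed: Single short-circuiting any() pass instead of building a 0/1 flag list and then scanning it for 1.
import Mathlib
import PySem

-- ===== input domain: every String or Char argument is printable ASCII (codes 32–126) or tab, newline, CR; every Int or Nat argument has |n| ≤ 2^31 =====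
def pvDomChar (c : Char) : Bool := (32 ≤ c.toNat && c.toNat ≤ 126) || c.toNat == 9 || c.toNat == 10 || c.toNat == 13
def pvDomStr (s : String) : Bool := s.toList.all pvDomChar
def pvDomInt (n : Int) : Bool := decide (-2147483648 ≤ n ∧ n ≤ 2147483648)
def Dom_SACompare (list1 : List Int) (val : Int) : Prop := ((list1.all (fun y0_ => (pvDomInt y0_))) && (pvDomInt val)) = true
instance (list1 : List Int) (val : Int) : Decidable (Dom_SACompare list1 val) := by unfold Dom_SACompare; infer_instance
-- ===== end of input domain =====

-- ===== PORT A =====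
-- A: build a 0/1 flag list, then test membership of 1
def SACompare (list1 : List Int) (val : Int) : Bool :=
  let l := list1.foldl (fun l x => if x ≥ val then l ++ [(1:Int)] else l ++ [(0:Int)]) []
  if (1:Int) ∈ l then true else false

-- ===== PORT B =====
-- B: one short-circuiting pass (any)
def SACompare_alt (list1 : List Int) (val : Int) : Bool :=
  list1.any (fun x => x ≥ val)

-- ===== PRECONDITION & SPEC =====
def Spec_SACompare (list1 : List Int) (val : Int) (out : Bool) : Prop := out = SACompare_alt list1 val
instance (list1 : List Int) (val : Int) (out : Bool) : Decidable (Spec_SACompare list1 val out) := by unfold Spec_SACompare; infer_instance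

-- ===== CLAIM (what is proved, stated in full; the proofs are below) =====
def Claim_equal_SACompare : Prop := ∀ (list1 : List Int) (val : Int), Dom_SACompare list1 val → Spec_SACompare list1 val (SACompare list1 val)

-- ===== LEMMAS AND PROOFS =====

-- ===== VERDICT (by name: the statement is the Claim_ definition above) =====
-- invariant: membership of 1 in the accumulated flag list
theorem SACompare_flags (val : Int) (list1 acc : List Int) :
    ((1:Int) ∈ list1.foldl (fun l x => if x ≥ val then l ++ [(1:Int)] else l ++ [(0:Int)]) acc)
      ↔ ((1:Int) ∈ acc ∨ list1.any (fun x => x ≥ val) = true) := by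
  induction list1 generalizing acc with
  | nil => simp
  | cons x xs ih =>
    simp only [List.foldl_cons, List.any_cons, ih]
    split_ifs with h <;> simp [h]

theorem SACompare_spec : Claim_equal_SACompare := by
  intro list1 val _
  unfold Spec_SACompare SACompare SACompare_alt
  by_cases h : list1.any (fun x => x ≥ val) = true <;>
    simp [SACompare_flags, h]
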